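-- pv_equiv track=rewrite | github.com/Duc-Quang-0310/flask-api | common/decode.py | str_length_with_position
-- ===== SOURCE A (Python) =====
-- import math
--
-- def str_length_with_position(length: int, order_arr: list[int]):
--     total_char: list[int] = []
--     attempts = 2000
--     length_tmp = length
--     appearance = 0
--
--     for index in range(math.ceil(length / 3)):
--         total_char.append(0)
--
--     while attempts > 0:
--         for i in range(math.ceil(length / 3)):
--             if order_arr[i] == appearance:
--                 if length_tmp > 3:
--                     total_char[i] = 3
--                 else:
--                     total_char[i] = length_tmp
--
--                 length_tmp = length_tmp - 3
--                 appearance += 1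
--
--         if 0 not in total_char:
--             break
--
--     return total_char
-- ===== SOURCE B (Python) =====
-- import math
--
-- def str_length_with_position(length: int, order_arr: list[int]):
--     # rank r gets chunk min(3, length - 3*r); position i holds rank order_arr[i]
--     n = math.ceil(length / 3)
--     return [min(3, length - 3 * order_arr[i]) for i in range(n)]
-- ===== Notes on version B (the rewrite author's own statement) =====
-- stated objective: alternative
-- what changed: B replaces A's repeated whole-array sweeps (re-scanning until every position is filled) by a single direct pass computing each position's chunk as min(3, length - 3*order_arr[i]); intended as asymptotically faster (O(n) vs O(n^2) sweeps) but a timing run could not confirm it (A's loop does not terminate on random non-permutation inputs). Pre_ excludes only inputs where A raises IndexError or loops forever (length > 0 and the first ceil(length/3) entries of order_arr not a permutation of 0..n-1).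
import Mathlib
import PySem

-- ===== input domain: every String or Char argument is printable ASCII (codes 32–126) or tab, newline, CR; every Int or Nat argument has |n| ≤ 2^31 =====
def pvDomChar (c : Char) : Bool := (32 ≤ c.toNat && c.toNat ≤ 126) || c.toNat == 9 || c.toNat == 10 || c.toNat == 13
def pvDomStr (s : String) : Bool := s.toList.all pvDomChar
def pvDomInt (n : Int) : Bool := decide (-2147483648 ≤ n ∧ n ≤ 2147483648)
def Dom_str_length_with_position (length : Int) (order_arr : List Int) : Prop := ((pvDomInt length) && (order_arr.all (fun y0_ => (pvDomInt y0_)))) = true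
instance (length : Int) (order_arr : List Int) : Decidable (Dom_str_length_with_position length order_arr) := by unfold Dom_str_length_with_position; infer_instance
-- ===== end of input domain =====

-- B replaces A's repeated whole-array sweeps by one direct pass assigning min(3, length - 3*order_arr[i]).
-- Pre_ excludes exactly the inputs on which A raises IndexError or never returns (infinite while loop).

-- ===== PORT A =====

/-- `math.ceil(length / 3)` — exact integer ceiling `-((-length) // 3)`; the float detour in
    Python is exact for the |length| ≤ 2^31 domain. -/
def pvCeil3 (length : Int) : Int := -(PySem.Int.floordiv (-length) 3)

/-- body of A's inner `for i in range(...)`; state = (total_char, length_tmp, appearance).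
    `pyGet? = none` is where Python raises IndexError (excluded by Pre_); the state is left as is there. -/
def pvStepA (order_arr : List Int) (st : List Int × Int × Int) (i : Int) : List Int × Int × Int :=
  match PySem.List.pyGet? order_arr i with
  | none => st
  | some o =>
    if o = st.2.2 then
      let v : Int := if st.2.1 > 3 then 3 else st.2.1
      (PySem.List.pySetD st.1 i v, st.2.1 - 3, st.2.2 + 1)
    else st

/-- A's `while attempts > 0` loop: `attempts` is never decremented, so it is `while True: sweep;
    if 0 not in total_char: break` and Python diverges when the break is never reached; the fuel
    bounds the number of sweeps, which is sufficient on every input of Pre_. -/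
def pvLoopA (length : Int) (order_arr : List Int) : Nat → (List Int × Int × Int) → List Int
  | 0, st => st.1
  | fuel+1, st =>
    let st' := (PySem.List.pyRange 0 (pvCeil3 length) 1).foldl (pvStepA order_arr) st
    if (0:Int) ∈ st'.1 then pvLoopA length order_arr fuel st' else st'.1

def str_length_with_position (length : Int) (order_arr : List Int) : List Int :=
  let total_char : List Int :=
    (PySem.List.pyRange 0 (pvCeil3 length) 1).foldl (fun acc _ => acc ++ [(0:Int)]) []
  pvLoopA length order_arr ((pvCeil3 length).toNat + 1) (total_char, length, 0)

-- ===== PORT B =====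

def str_length_with_position_alt (length : Int) (order_arr : List Int) : List Int :=
  (PySem.List.pyRange 0 (pvCeil3 length) 1).map
    (fun i => min 3 (length - 3 * PySem.List.pyGetD order_arr i 0))

-- ===== PRECONDITION & SPEC =====

/-- Exactly the inputs on which A returns: either `length ≤ 0` (A returns `[]` at once), or the
    first `ceil(length/3)` entries of `order_arr` are a permutation of `0..n-1`.  Otherwise A
    raises IndexError (list shorter than `n`) or its `while` loop never breaks (A diverges). -/
def Pre_str_length_with_position (length : Int) (order_arr : List Int) : Prop :=
  length ≤ 0 ∨
    ((pvCeil3 length).toNat ≤ order_arr.length ∧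
      (order_arr.take (pvCeil3 length).toNat).Perm
        ((List.range (pvCeil3 length).toNat).map (fun k : Nat => (k : Int))))
instance (length : Int) (order_arr : List Int) : Decidable (Pre_str_length_with_position length order_arr) := by unfold Pre_str_length_with_position; infer_instance

def pvWitness_str_length_with_position : Int × List Int := (7, [1, 2, 0])

def Spec_str_length_with_position (length : Int) (order_arr : List Int) (out : List Int) : Prop := out = str_length_with_position_alt length order_arr
instance (length : Int) (order_arr : List Int) (out : List Int) : Decidable (Spec_str_length_with_position length order_arr out) := by unfold Spec_str_length_with_position; infer_instance

-- ===== CLAIM (what is proved, stated in full; the proofs are below) =====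
def Claim_equal_str_length_with_position : Prop := ∀ (length : Int) (order_arr : List Int), Dom_str_length_with_position length order_arr → Pre_str_length_with_position length order_arr → Spec_str_length_with_position length order_arr (str_length_with_position length order_arr)

-- ===== LEMMAS AND PROOFS =====

/-- Loop invariant for A: with `appearance = a`, every position whose rank is `< a` already holds
    its chunk `min 3 (length - 3*rank)` and every other position still holds `0`. -/
def pvInv (length : Int) (order : List Int) (N : Nat) (a : Int) (tc : List Int) : Prop :=
  tc.length = N ∧
    ∀ k, k < N → tc.getD k 0 =
      if order.getD k 0 < a then min 3 (length - 3 * order.getD k 0) else 0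

theorem pvSweep (length : Int) (order : List Int) (N : Nat)
    (hlen : N ≤ order.length)
    (hmem : ∀ k, k < N → order.getD k 0 < (N : Int))
    (hinj : ∀ j k, j < N → k < N → order.getD j 0 = order.getD k 0 → j = k) :
    ∀ (l : List Int) (tc : List Int) (a : Int),
      (∀ i ∈ l, 0 ≤ i ∧ i.toNat < N) → 0 ≤ a → a ≤ (N : Int) → pvInv length order N a tc →
      ∃ a' tc', l.foldl (pvStepA order) (tc, length - 3 * a, a) = (tc', length - 3 * a', a') ∧
        a ≤ a' ∧ a' ≤ (N : Int) ∧ 0 ≤ a' ∧ pvInv length order N a' tc' ∧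
        ((∃ i ∈ l, order.getD i.toNat 0 = a) → a < a') := by
  intro l
  induction l with
  | nil =>
    intro tc a _ ha0 haN hinv
    exact ⟨a, tc, rfl, le_refl _, haN, ha0, hinv, by rintro ⟨i, hi, -⟩; cases hi⟩
  | cons i t ih =>
    intro tc a hl ha0 haN hinv
    obtain ⟨hi0, hiN⟩ := hl i (List.mem_cons_self ..)
    have hilt : i.toNat < order.length := lt_of_lt_of_le hiN hlen
    have hget : PySem.List.pyGet? order i = some (order.getD i.toNat 0) := by
      rw [PySem.List.pyGet?_of_nonneg order hi0, List.getElem?_eq_getElem hilt,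
        List.getD_eq_getElem order 0 hilt]
    by_cases ho : order.getD i.toNat 0 = a
    · -- match: assign chunk, appearance += 1
      have haltN : a < (N : Int) := ho ▸ hmem i.toNat hiN
      have hstep : pvStepA order (tc, length - 3 * a, a) i =
          (PySem.List.pySetD tc i (min 3 (length - 3 * a)), length - 3 * (a + 1), a + 1) := by
        have hv : (if length - 3 * a > 3 then (3:Int) else length - 3 * a) =
            min 3 (length - 3 * a) := by
          rw [min_def]; split_ifs <;> omega
        have harith : length - 3 * a - 3 = length - 3 * (a + 1) := by ring
        simp only [pvStepA, hget, ho, if_true, hv, harith]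
      have hinv' : pvInv length order N (a + 1) (PySem.List.pySetD tc i (min 3 (length - 3 * a))) := by
        obtain ⟨htl, hval⟩ := hinv
        rw [PySem.List.pySetD_of_nonneg tc _ hi0]
        refine ⟨by simpa using htl, ?_⟩
        intro k hk
        have hkl : k < tc.length := by omega
        rw [List.getD_eq_getElem _ 0 (by simpa using hkl), List.getElem_set]
        by_cases hki : i.toNat = k
        · subst hki
          rw [if_pos rfl, if_pos (by omega), ho]
        · rw [if_neg hki]
          have hne : order.getD k 0 ≠ a := fun h =>
            hki (hinj i.toNat k hiN hk (by rw [ho, h]))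
          rw [← List.getD_eq_getElem tc 0 hkl, hval k hk]
          by_cases hlt : order.getD k 0 < a
          · rw [if_pos hlt, if_pos (by omega)]
          · rw [if_neg hlt, if_neg (by omega)]
      obtain ⟨a', tc', heq, h1, h2, h3, h4, -⟩ :=
        ih (PySem.List.pySetD tc i (min 3 (length - 3 * a))) (a + 1)
          (fun j hj => hl j (List.mem_cons_of_mem _ hj)) (by omega) (by omega) hinv'
      exact ⟨a', tc', by rw [List.foldl_cons, hstep, heq], by omega, h2, h3, h4, fun _ => by omega⟩
    · -- no match: state unchanged
      have hstep : pvStepA order (tc, length - 3 * a, a) i = (tc, length - 3 * a, a) := by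
        simp only [pvStepA, hget, if_neg ho]
      obtain ⟨a', tc', heq, h1, h2, h3, h4, hprog⟩ :=
        ih tc a (fun j hj => hl j (List.mem_cons_of_mem _ hj)) ha0 haN hinv
      refine ⟨a', tc', by rw [List.foldl_cons, hstep, heq], h1, h2, h3, h4, ?_⟩
      rintro ⟨j, hj, hjv⟩
      rcases List.mem_cons.mp hj with rfl | hjt
      · exact absurd hjv ho
      · exact hprog ⟨j, hjt, hjv⟩

theorem pvLoop (length : Int) (order : List Int) (N : Nat)
    (hN : (pvCeil3 length).toNat = N) (hNpos : 0 < N) (hlb : 3 * ((N : Int) - 1) < length)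
    (hlen : N ≤ order.length)
    (hmem : ∀ k, k < N → 0 ≤ order.getD k 0 ∧ order.getD k 0 < (N : Int))
    (hinj : ∀ j k, j < N → k < N → order.getD j 0 = order.getD k 0 → j = k)
    (hex : ∀ r : Int, 0 ≤ r → r < (N : Int) → ∃ k, k < N ∧ order.getD k 0 = r) :
    ∀ (fuel : Nat) (tc : List Int) (a : Int),
      0 ≤ a → a ≤ (N : Int) → pvInv length order N a tc → N - a.toNat < fuel →
      pvLoopA length order fuel (tc, length - 3 * a, a) =
        str_length_with_position_alt length order := by
  have hceil : pvCeil3 length = (N : Int) := by omega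
  intro fuel
  induction fuel with
  | zero => intro tc a _ _ _ hf; exact absurd hf (by omega)
  | succ f ih =>
    intro tc a ha0 haN hinv hf
    have hl : ∀ i ∈ PySem.List.pyRange 0 (pvCeil3 length) 1, 0 ≤ i ∧ i.toNat < N := by
      intro i hi
      rw [hceil, PySem.List.mem_pyRange_one] at hi
      exact ⟨hi.1, by omega⟩
    obtain ⟨a', tc', heq, haa', ha'N, ha'0, hinv', hprog⟩ :=
      pvSweep length order N hlen (fun k hk => (hmem k hk).2) hinj
        (PySem.List.pyRange 0 (pvCeil3 length) 1) tc a hl ha0 haN hinv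
    -- characterize the `0 not in total_char` test
    have hz_of_lt : a' < (N : Int) → (0 : Int) ∈ tc' := by
      intro hlt
      obtain ⟨k, hk, hkv⟩ := hex a' ha'0 hlt
      have h0 : tc'.getD k 0 = 0 := by
        rw [hinv'.2 k hk, hkv, if_neg (by omega)]
      have hkl : k < tc'.length := by rw [hinv'.1]; exact hk
      rw [List.getD_eq_getElem _ 0 hkl] at h0
      exact h0 ▸ List.getElem_mem hkl
    have hz_to_lt : (0 : Int) ∈ tc' → a' < (N : Int) := by
      intro hz
      by_contra hge
      have ha'eq : a' = (N : Int) := le_antisymm ha'N (by omega)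
      obtain ⟨k, hkl, hkv⟩ := List.mem_iff_getElem.mp hz
      have hkN : k < N := by rw [← hinv'.1]; exact hkl
      have := hinv'.2 k hkN
      rw [List.getD_eq_getElem _ 0 hkl, hkv] at this
      obtain ⟨hk0, hkN'⟩ := hmem k hkN
      rw [if_pos (by omega)] at this
      have : min 3 (length - 3 * order.getD k 0) ≥ 1 := by
        rw [min_def]; split_ifs <;> omega
      omega
    simp only [pvLoopA, heq]
    by_cases hz : (0 : Int) ∈ tc'
    · rw [if_pos hz]
      have hlt : a' < (N : Int) := hz_to_lt hz
      have hprog' : a < a' := hprog (by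
        obtain ⟨k, hk, hkv⟩ := hex a ha0 (by omega)
        exact ⟨(k : Int), by rw [hceil, PySem.List.mem_pyRange_one]; constructor <;> omega,
          by simpa using hkv⟩)
      exact ih tc' a' ha'0 ha'N hinv' (by omega)
    · rw [if_neg hz]
      have ha'eq : a' = (N : Int) := by
        by_contra hne
        exact hz (hz_of_lt (lt_of_le_of_ne ha'N hne))
      -- tc' is exactly B's list
      unfold str_length_with_position_alt
      have hlen' : tc'.length = ((PySem.List.pyRange 0 (pvCeil3 length) 1).map
          (fun i => min 3 (length - 3 * PySem.List.pyGetD order i 0))).length := by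
        rw [List.length_map, PySem.List.length_pyRange_one, hinv'.1]
        omega
      apply List.ext_getElem hlen'
      intro k hk1 hk2
      have hkN : k < N := by rw [← hinv'.1]; exact hk1
      have hkr : k < (PySem.List.pyRange 0 (pvCeil3 length) 1).length := by
        simpa using hk2
      rw [List.getElem_map]
      rw [PySem.List.getElem_pyRange_one]
      have hval := hinv'.2 k hkN
      rw [List.getD_eq_getElem _ 0 hk1] at hval
      rw [hval, if_pos (by rw [ha'eq]; exact (hmem k hkN).2)]
      simp [PySem.List.pyGetD_natCast]

-- ===== VERDICT (by name: the statement is the Claim_ definition above) =====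
theorem str_length_with_position_spec : Claim_equal_str_length_with_position := by
  intro length order _ hpre
  unfold Spec_str_length_with_position
  by_cases hle : length ≤ 0
  · -- length ≤ 0: n ≤ 0, both sides are []
    have hn : pvCeil3 length ≤ 0 := by
      unfold pvCeil3
      have h0 : 0 ≤ PySem.Int.floordiv (-length) 3 := by
        rw [PySem.Int.le_floordiv_iff_mul_le (by norm_num : (0:Int) < 3)]
        omega
      omega
    have hr : PySem.List.pyRange 0 (pvCeil3 length) 1 = [] :=
      PySem.List.pyRange_one_eq_nil (by omega)
    simp [str_length_with_position, str_length_with_position_alt, hr, pvLoopA]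
  · -- length > 0: the first n entries of order_arr are a permutation of 0..n-1
    have hpos : 0 < length := by omega
    rcases hpre with hle' | ⟨-, hperm⟩
    · omega
    have hbounds := (PySem.Int.neg_floordiv_neg_eq_iff_of_pos (q := pvCeil3 length)
      (by norm_num : (0:Int) < 3)).mp rfl
    set N := (pvCeil3 length).toNat with hNdef
    have hunf : pvCeil3 length = -(PySem.Int.floordiv (-length) 3) := rfl
    have hNpos : 0 < N := by omega
    have hceil : pvCeil3 length = (N : Int) := by omega
    rw [hceil] at hbounds
    -- facts from the permutation
    have hlenN : (order.take N).length = N := by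
      rw [hperm.length_eq, List.length_map, List.length_range]
    have hlen : N ≤ order.length := by
      rw [List.length_take] at hlenN; omega
    have hgetD : ∀ k, k < N → order.getD k 0 = (order.take N).getD k 0 := by
      intro k hk
      rw [List.getD_eq_getElem _ 0 (by omega), List.getD_eq_getElem _ 0 (by omega),
        List.getElem_take]
    have hmem : ∀ k, k < N → 0 ≤ order.getD k 0 ∧ order.getD k 0 < (N : Int) := by
      intro k hk
      have hm : order.getD k 0 ∈ order.take N := by
        rw [hgetD k hk, List.getD_eq_getElem _ 0 (by omega)]
        exact List.getElem_mem _
      rw [hperm.mem_iff, List.mem_map] at hm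
      obtain ⟨j, hj, hjv⟩ := hm
      rw [List.mem_range] at hj
      constructor <;> omega
    have hnodup : (order.take N).Nodup := by
      refine hperm.nodup_iff.mpr ?_
      exact (List.nodup_range).map (fun a b h => by exact_mod_cast h)
    have hinj : ∀ j k, j < N → k < N → order.getD j 0 = order.getD k 0 → j = k := by
      intro j k hj hk hv
      rw [hgetD j hj, hgetD k hk, List.getD_eq_getElem _ 0 (by omega),
        List.getD_eq_getElem _ 0 (by omega)] at hv
      exact (List.Nodup.getElem_inj_iff hnodup).mp hv
    have hex : ∀ r : Int, 0 ≤ r → r < (N : Int) → ∃ k, k < N ∧ order.getD k 0 = r := by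
      intro r hr0 hrN
      have hm : r ∈ order.take N := by
        rw [hperm.mem_iff, List.mem_map]
        exact ⟨r.toNat, List.mem_range.mpr (by omega), by omega⟩
      obtain ⟨k, hkl, hkv⟩ := List.mem_iff_getElem.mp hm
      refine ⟨k, by omega, ?_⟩
      rw [hgetD k (by omega), List.getD_eq_getElem _ 0 hkl, hkv]
    -- the initial total_char is N zeros and satisfies the invariant at appearance 0
    have hinit : (PySem.List.pyRange 0 (pvCeil3 length) 1).foldl
        (fun acc _ => acc ++ [(0:Int)]) [] =
        (PySem.List.pyRange 0 (pvCeil3 length) 1).map (fun _ => (0:Int)) := by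
      simp [PySem.List.foldl_append_singleton_eq_map (fun _ : Int => (0:Int))
        (PySem.List.pyRange 0 (pvCeil3 length) 1) []]
    have hinv0 : pvInv length order N 0
        ((PySem.List.pyRange 0 (pvCeil3 length) 1).map (fun _ => (0:Int))) := by
      constructor
      · rw [List.length_map, PySem.List.length_pyRange_one]; omega
      · intro k hk
        have hkl : k < ((PySem.List.pyRange 0 (pvCeil3 length) 1).map (fun _ => (0:Int))).length := by
          rw [List.length_map, PySem.List.length_pyRange_one]; omega
        rw [List.getD_eq_getElem _ 0 hkl, List.getElem_map,
          if_neg (by have := (hmem k hk).1; omega)]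
    unfold str_length_with_position
    rw [hinit]
    have := pvLoop length order N hNdef.symm hNpos (by omega) hlen hmem hinj hex
      (N + 1) ((PySem.List.pyRange 0 (pvCeil3 length) 1).map (fun _ => (0:Int))) 0
      le_rfl (by omega) hinv0 (by omega)
    rw [hNdef.symm]
    simpa using this
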